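-- pv_equiv track=rewrite | github.com/gabriellaec/desoft-analise-exercicios | backup/user_070/ch170_2020_06_20_04_29_10_284585.py | apaga_repetidos
-- ===== SOURCE A (Python) =====
-- def apaga_repetidos(string):
--     lista = []
--     new = ''
--     for i in range(len(string)):
--         add = ''
--         for x in lista:
--             if string[i].upper() == x.upper():
--                 add = '*'
--                 new += add
--         if add != '*':
--             add = string[i]
--             new += add
--             lista.append(add)
--     return new
-- ===== SOURCE B (Python) =====
-- def apaga_repetidos(string):
--     first = {}
--     for i, c in enumerate(string):
--         first.setdefault(c.upper(), i)
--     return ''.join(c if first[c.upper()] == i else '*' for i, c in enumerate(string))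
-- ===== Notes on version B (the rewrite author's own statement) =====
-- stated objective: faster
-- what changed: Replaces A's single interleaved loop that linearly scans a growing list of seen characters with two passes: one building a dict from uppercased character to its first index, and one mapping each position to itself or to the replacement character by comparing indices.
import Mathlib
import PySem

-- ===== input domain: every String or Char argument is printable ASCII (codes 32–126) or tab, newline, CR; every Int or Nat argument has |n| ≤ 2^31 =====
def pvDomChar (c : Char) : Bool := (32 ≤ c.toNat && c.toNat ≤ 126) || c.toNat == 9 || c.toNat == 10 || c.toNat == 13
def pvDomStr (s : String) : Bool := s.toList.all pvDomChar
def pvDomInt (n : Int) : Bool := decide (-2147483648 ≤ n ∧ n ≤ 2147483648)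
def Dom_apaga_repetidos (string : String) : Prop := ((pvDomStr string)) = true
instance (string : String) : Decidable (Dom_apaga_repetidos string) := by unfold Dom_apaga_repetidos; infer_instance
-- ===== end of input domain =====

-- B replaces A's interleaved grow-and-scan loop with a first-index table pass plus a mapping pass (alternative decomposition).

-- ===== PORT A =====
-- one iteration of A's outer loop: inner scan of `lista` (may append '*' to `new`), then the add-check
def apagaStepA (st : List Char × List Char) (c : Char) : List Char × List Char :=
  let inner := st.1.foldl
    (fun (p : List Char × List Char) x =>
      if PySem.Chars.upperChar c == PySem.Chars.upperChar x then (['*'], p.2 ++ ['*']) else p)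
    ([], st.2)
  if inner.1 ≠ ['*'] then (st.1 ++ [c], inner.2 ++ [c]) else (st.1, inner.2)

def apaga_repetidos (string : String) : String :=
  String.mk (string.toList.foldl apagaStepA ([], [])).2

-- ===== PORT B =====
-- first.setdefault(c.upper(), i)
def setdefaultStep (d : PySem.Dict Char Int) (p : Int × Char) : PySem.Dict Char Int :=
  if (PySem.Dict.get? d (PySem.Chars.upperChar p.2)).isSome then d
  else PySem.Dict.insert d (PySem.Chars.upperChar p.2) p.1

def apaga_repetidos_alt (string : String) : String :=
  let cs := string.toList
  let first : PySem.Dict Char Int :=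
    (PySem.List.enumerate cs 0).foldl setdefaultStep PySem.Dict.empty
  String.mk ((PySem.List.enumerate cs 0).map
    (fun p => if PySem.Dict.getD first (PySem.Chars.upperChar p.2) (-1) == p.1 then p.2 else '*'))

-- ===== PRECONDITION & SPEC =====
def Spec_apaga_repetidos (string : String) (out : String) : Prop := out = apaga_repetidos_alt string
instance (string : String) (out : String) : Decidable (Spec_apaga_repetidos string out) := by unfold Spec_apaga_repetidos; infer_instance

-- ===== CLAIM (what is proved, stated in full; the proofs are below) =====
def Claim_equal_apaga_repetidos : Prop := ∀ (string : String), Dom_apaga_repetidos string → Spec_apaga_repetidos string (apaga_repetidos string)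

-- ===== LEMMAS AND PROOFS =====

-- reference: a char becomes '*' iff its uppercase occurred among the uppercases of the prefix
def refStars (seen : List Char) : List Char → List Char
  | [] => []
  | c :: cs =>
      (if PySem.Chars.upperChar c ∈ seen then '*' else c)
        :: refStars (seen ++ [PySem.Chars.upperChar c]) cs

-- index of the first position (counted from s) whose uppercase equals k
def fIdx? (k : Char) (s : Int) : List Char → Option Int
  | [] => none
  | c :: cs => if PySem.Chars.upperChar c = k then some s else fIdx? k (s + 1) cs

theorem fIdx?_append (k : Char) (pre : List Char) :
    ∀ (s : Int) (rest : List Char),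
      fIdx? k s (pre ++ rest) = (fIdx? k s pre).orElse (fun _ => fIdx? k (s + pre.length) rest) := by
  induction pre with
  | nil => intro s rest; simp [fIdx?]
  | cons c pre ih =>
      intro s rest
      by_cases h : PySem.Chars.upperChar c = k
      · simp [fIdx?, h]
      · simp only [List.cons_append, fIdx?, if_neg h]
        rw [ih]
        have harg : s + 1 + (pre.length : Int) = s + ((c :: pre).length : Int) := by
          simp only [List.length_cons]; push_cast; ring
        rw [harg]

theorem fIdx?_bounds (k : Char) (pre : List Char) :
    ∀ (s : Int) (j : Int), fIdx? k s pre = some j → s ≤ j ∧ j < s + pre.length := by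
  induction pre with
  | nil => intro s j h; simp [fIdx?] at h
  | cons c pre ih =>
      intro s j h
      simp only [fIdx?] at h
      by_cases hc : PySem.Chars.upperChar c = k
      · rw [if_pos hc] at h
        have hj : j = s := (Option.some.inj h).symm
        subst hj
        simp only [List.length_cons]
        push_cast
        omega
      · rw [if_neg hc] at h
        have := ih (s + 1) j h
        simp only [List.length_cons]
        push_cast
        omega

theorem fIdx?_none_iff (k : Char) (pre : List Char) :
    ∀ (s : Int), fIdx? k s pre = none ↔ k ∉ pre.map PySem.Chars.upperChar := by
  induction pre with
  | nil => intro s; simp [fIdx?]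
  | cons c pre ih =>
      intro s
      simp only [fIdx?, List.map_cons, List.mem_cons]
      by_cases hc : PySem.Chars.upperChar c = k
      · simp [hc]
      · have hk : k ≠ PySem.Chars.upperChar c := fun h => hc h.symm
        simp [hc, hk, ih (s + 1)]

-- characterisation of the setdefault-building fold
theorem buildGet (cs : List Char) :
    ∀ (s : Int) (d : PySem.Dict Char Int) (k : Char),
      PySem.Dict.get? ((PySem.List.enumerate cs s).foldl setdefaultStep d) k
        = (PySem.Dict.get? d k).orElse (fun _ => fIdx? k s cs) := by
  induction cs with
  | nil => intro s d k; simp [PySem.List.enumerate_nil, fIdx?]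
  | cons c cs ih =>
      intro s d k
      rw [PySem.List.enumerate_cons]
      simp only [List.foldl_cons]
      rw [ih]
      simp only [setdefaultStep, fIdx?]
      by_cases hd : (PySem.Dict.get? d (PySem.Chars.upperChar c)).isSome
      · rw [if_pos hd]
        by_cases hk : PySem.Chars.upperChar c = k
        · subst hk
          rcases Option.isSome_iff_exists.mp hd with ⟨v, hv⟩
          simp [hv]
        · simp [hk]
      · rw [if_neg hd]
        rw [PySem.Dict.get?_insert]
        by_cases hk : PySem.Chars.upperChar c = k
        · subst hk
          have hnone : PySem.Dict.get? d (PySem.Chars.upperChar c) = none :=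
            Option.not_isSome_iff_eq_none.mp hd
          simp [hnone]
        · have hk' : k ≠ PySem.Chars.upperChar c := fun h => hk h.symm
          simp [hk, hk']

-- B's mapping pass computes refStars over the uppercased prefix
theorem mapB_eq_refStars (cs0 : List Char) :
    ∀ (cs pre : List Char), pre ++ cs = cs0 →
      (PySem.List.enumerate cs (pre.length : Int)).map
          (fun p => if PySem.Dict.getD
              ((PySem.List.enumerate cs0 0).foldl setdefaultStep PySem.Dict.empty)
              (PySem.Chars.upperChar p.2) (-1) == p.1 then p.2 else '*')
        = refStars (pre.map PySem.Chars.upperChar) cs := by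
  intro cs
  induction cs with
  | nil => intro pre h; simp [PySem.List.enumerate_nil, refStars]
  | cons c cs ih =>
      intro pre h
      rw [PySem.List.enumerate_cons]
      simp only [List.map_cons, refStars]
      rw [List.cons_eq_cons]
      constructor
      · -- head
        have hget : PySem.Dict.get?
            ((PySem.List.enumerate cs0 0).foldl setdefaultStep PySem.Dict.empty)
            (PySem.Chars.upperChar c) = fIdx? (PySem.Chars.upperChar c) 0 cs0 := by
          rw [buildGet]; simp [PySem.Dict.get?_empty]
        have hsplit : fIdx? (PySem.Chars.upperChar c) 0 cs0
            = (fIdx? (PySem.Chars.upperChar c) 0 pre).orElse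
                (fun _ => fIdx? (PySem.Chars.upperChar c) (0 + pre.length) (c :: cs)) := by
          rw [← h, fIdx?_append]
        by_cases hm : PySem.Chars.upperChar c ∈ pre.map PySem.Chars.upperChar
        · -- seen before: fIdx? lands strictly below pre.length
          rw [if_pos hm]
          have hne : fIdx? (PySem.Chars.upperChar c) 0 pre ≠ none := by
            intro hn
            exact ((fIdx?_none_iff _ _ _).mp hn) hm
          rcases Option.ne_none_iff_exists'.mp hne with ⟨j, hj⟩
          have hb := fIdx?_bounds (PySem.Chars.upperChar c) pre 0 j hj
          have : PySem.Dict.getD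
              ((PySem.List.enumerate cs0 0).foldl setdefaultStep PySem.Dict.empty)
              (PySem.Chars.upperChar c) (-1) = j := by
            simp [PySem.Dict.getD, hget, hsplit, hj]
          rw [this]
          have : j ≠ (pre.length : Int) := by omega
          simp [this]
        · -- first occurrence: fIdx? is exactly pre.length
          rw [if_neg hm]
          have hnone : fIdx? (PySem.Chars.upperChar c) 0 pre = none := by
            rw [fIdx?_none_iff]; exact hm
          have : PySem.Dict.getD
              ((PySem.List.enumerate cs0 0).foldl setdefaultStep PySem.Dict.empty)
              (PySem.Chars.upperChar c) (-1) = (pre.length : Int) := by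
            simp [PySem.Dict.getD, hget, hsplit, hnone, fIdx?]
          simp [this]
      · -- tail: shift the prefix by one
        have h' : (pre ++ [c]) ++ cs = cs0 := by simpa using h
        have := ih (pre ++ [c]) h'
        simp only [List.length_append, List.length_cons, List.length_nil, List.map_append,
          List.map_cons, List.map_nil] at this
        have harg : ((pre.length : Int) + 1) = ((pre.length + 1 : Nat) : Int) := by push_cast; ring
        rw [harg]
        simpa using this

-- A's inner scan on a case-insensitively duplicate-free `lista`
theorem innerA_eq (c : Char) (lista : List Char) (new : List Char)
    (hnd : (lista.map PySem.Chars.upperChar).Nodup) :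
    lista.foldl
        (fun (p : List Char × List Char) x =>
          if PySem.Chars.upperChar c == PySem.Chars.upperChar x then (['*'], p.2 ++ ['*']) else p)
        ([], new)
      = if PySem.Chars.upperChar c ∈ lista.map PySem.Chars.upperChar
          then (['*'], new ++ ['*']) else ([], new) := by
  induction lista generalizing new with
  | nil => simp
  | cons x lista ih =>
      simp only [List.map_cons, List.nodup_cons] at hnd
      simp only [List.foldl_cons, List.map_cons, List.mem_cons]
      by_cases hx : PySem.Chars.upperChar c = PySem.Chars.upperChar x
      · have hb : (PySem.Chars.upperChar c == PySem.Chars.upperChar x) = true := by simp [hx]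
        rw [if_pos hb]
        have hnomatch : lista.foldl
            (fun (p : List Char × List Char) y =>
              if PySem.Chars.upperChar c == PySem.Chars.upperChar y then (['*'], p.2 ++ ['*']) else p)
            (['*'], new ++ ['*']) = (['*'], new ++ ['*']) := by
          rw [PySem.List.foldl_congr_mem (g := fun acc _ => acc)]
          · exact PySem.List.foldl_ignore _ _
          · intro acc y hy
            have : PySem.Chars.upperChar c ≠ PySem.Chars.upperChar y := by
              rw [hx]
              intro hcontra
              exact hnd.1 (hcontra ▸ List.mem_map_of_mem hy)
            simp [this]
        rw [hnomatch, if_pos (Or.inl hx)]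
      · have : (PySem.Chars.upperChar c == PySem.Chars.upperChar x) = false := by
          simpa using hx
        rw [this]
        simp only [Bool.false_eq_true, if_false]
        rw [ih new hnd.2]
        simp [hx]

-- A's outer fold computes refStars (seen via `lista`, whose uppercases track the prefix's)
theorem foldA_eq_refStars (cs : List Char) :
    ∀ (lista new seen : List Char),
      (lista.map PySem.Chars.upperChar).Nodup →
      (∀ k, k ∈ lista.map PySem.Chars.upperChar ↔ k ∈ seen) →
      (cs.foldl apagaStepA (lista, new)).2 = new ++ refStars seen cs := by
  induction cs with
  | nil => intro lista new seen _ _; simp [refStars]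
  | cons c cs ih =>
      intro lista new seen hnd hmem
      simp only [List.foldl_cons, refStars]
      by_cases hm : PySem.Chars.upperChar c ∈ seen
      · have hml : PySem.Chars.upperChar c ∈ lista.map PySem.Chars.upperChar :=
          (hmem _).mpr hm
        have hstep : apagaStepA (lista, new) c = (lista, new ++ ['*']) := by
          simp only [apagaStepA, innerA_eq c lista new hnd, hml, if_pos]
          simp
        rw [hstep, ih lista (new ++ ['*']) (seen ++ [PySem.Chars.upperChar c]) hnd
          (by
            intro k
            rw [hmem k, List.mem_append]
            constructor
            · exact fun hk => Or.inl hk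
            · rintro (h1 | h1)
              · exact h1
              · have : k = PySem.Chars.upperChar c := by simpa using h1
                subst this; exact hm)]
        simp [hm]
      · have hml : PySem.Chars.upperChar c ∉ lista.map PySem.Chars.upperChar :=
          fun h => hm ((hmem _).mp h)
        have hstep : apagaStepA (lista, new) c = (lista ++ [c], new ++ [c]) := by
          simp only [apagaStepA, innerA_eq c lista new hnd, hml]
          simp
        rw [hstep, ih (lista ++ [c]) (new ++ [c]) (seen ++ [PySem.Chars.upperChar c])
          (by
            simp only [List.map_append, List.map_cons, List.map_nil, List.nodup_append]
            refine ⟨hnd, List.nodup_singleton _, ?_⟩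
            intro a ha b hb hab
            simp only [List.mem_singleton] at hb
            subst hb
            exact hml (hab ▸ ha))
          (by intro k; simp [List.mem_append, hmem k])]
        simp [hm]

-- ===== VERDICT (by name: the statement is the Claim_ definition above) =====
theorem apaga_repetidos_spec : Claim_equal_apaga_repetidos := by
  intro s _
  unfold Spec_apaga_repetidos apaga_repetidos apaga_repetidos_alt
  congr 1
  have hB := mapB_eq_refStars s.toList s.toList [] (by simp)
  simp only [List.length_nil, Nat.cast_zero, List.map_nil] at hB
  rw [foldA_eq_refStars s.toList [] [] [] (by simp) (by simp), hB]
  simp
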